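-- pv_equiv track=rewrite | github.com/mayankmeraki/tutor_v2 | backend/app/services/teaching/beat_repair.py | _balance_js_code
-- ===== SOURCE A (Python) =====
-- def _balance_js_code(code: str) -> str:
--     """Close unclosed braces/brackets/parens in truncated JS code.
--
--     The code was cut off mid-expression. We need to close everything
--     so it at least compiles. The geometry is already added to the scene
--     via scene.add() calls — the animation loop just won't run.
--     """
--     # Track nesting
--     depth_brace = 0   # {}
--     depth_paren = 0   # ()
--     depth_bracket = 0 # []
--     in_str = False
--     str_char = ''
--     esc = False
--
--     for ch in code:
--         if esc:
--             esc = False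
--             continue
--         if ch == '\\':
--             esc = True
--             continue
--         if in_str:
--             if ch == str_char:
--                 in_str = False
--             continue
--         if ch in ('"', "'", '`'):
--             in_str = True
--             str_char = ch
--             continue
--         if ch == '{': depth_brace += 1
--         elif ch == '}': depth_brace -= 1
--         elif ch == '(': depth_paren += 1
--         elif ch == ')': depth_paren -= 1
--         elif ch == '[': depth_bracket += 1
--         elif ch == ']': depth_bracket -= 1
--
--     # Close any open string
--     if in_str:
--         code += str_char
--
--     # Close brackets/parens/braces in reverse order
--     closers = ''
--     closers += ']' * max(0, depth_bracket)
--     closers += ')' * max(0, depth_paren)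
--     closers += '}' * max(0, depth_brace)
--
--     return code + closers
-- ===== SOURCE B (Python) =====
-- def _balance_js_code(code: str) -> str:
--     """Close unclosed braces/brackets/parens in truncated JS code.
--
--     Two passes: first run only the escape/string state machine and collect
--     every character lying outside a string literal; then compute each net
--     depth by counting the collected characters.
--     """
--     outside = []
--     in_str = False
--     str_char = ''
--     esc = False
--     for ch in code:
--         if esc:
--             esc = False
--             continue
--         if ch == '\\':
--             esc = True
--             continue
--         if in_str:
--             if ch == str_char:
--                 in_str = False
--             continue
--         if ch in ('"', "'", '`'):
--             in_str = True
--             str_char = ch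
--             continue
--         outside.append(ch)
--
--     cleaned = ''.join(outside)
--     suffix = str_char if in_str else ''
--     closers = (']' * max(0, cleaned.count('[') - cleaned.count(']'))
--                + ')' * max(0, cleaned.count('(') - cleaned.count(')'))
--                + '}' * max(0, cleaned.count('{') - cleaned.count('}')))
--     return code + suffix + closers
-- ===== Notes on version B (the rewrite author's own statement) =====
-- stated objective: alternative
-- what changed: Replaced the six-counter single-pass loop by a two-phase decomposition: one pass runs only the escape/string state machine and collects the characters outside string literals, then the net depths are obtained by counting delimiters in that cleaned text with str.count.
import Mathlib
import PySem

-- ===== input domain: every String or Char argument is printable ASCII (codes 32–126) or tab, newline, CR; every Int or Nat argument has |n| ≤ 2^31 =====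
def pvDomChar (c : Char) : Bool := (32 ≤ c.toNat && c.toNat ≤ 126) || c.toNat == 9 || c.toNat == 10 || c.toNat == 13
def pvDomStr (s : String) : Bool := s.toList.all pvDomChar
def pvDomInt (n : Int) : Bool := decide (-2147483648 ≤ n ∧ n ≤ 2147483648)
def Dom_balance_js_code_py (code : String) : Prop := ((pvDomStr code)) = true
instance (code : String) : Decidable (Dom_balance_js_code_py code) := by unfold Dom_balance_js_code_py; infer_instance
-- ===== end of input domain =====

-- B replaces A's six-state counting loop by a two-phase decomposition (extract the
-- characters outside string literals, then count delimiters); objective: alternative.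

-- ===== PORT A =====
-- state: (depth_brace, depth_paren, depth_bracket, in_str, str_char, esc);
-- str_char is Option Char (none = Python's initial '')
def stepA (s : Int × Int × Int × Bool × Option Char × Bool) (ch : Char) :
    Int × Int × Int × Bool × Option Char × Bool :=
  let (b, p, k, ins, sc, e) := s
  if e then (b, p, k, ins, sc, false)
  else if ch = '\\' then (b, p, k, ins, sc, true)
  else if ins then
    if some ch = sc then (b, p, k, false, sc, e) else (b, p, k, ins, sc, e)
  else if ch = '"' ∨ ch = '\'' ∨ ch = '`' then (b, p, k, true, some ch, e)
  else if ch = '{' then (b + 1, p, k, ins, sc, e)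
  else if ch = '}' then (b - 1, p, k, ins, sc, e)
  else if ch = '(' then (b, p + 1, k, ins, sc, e)
  else if ch = ')' then (b, p - 1, k, ins, sc, e)
  else if ch = '[' then (b, p, k + 1, ins, sc, e)
  else if ch = ']' then (b, p, k - 1, ins, sc, e)
  else (b, p, k, ins, sc, e)

def balance_js_code_py (code : String) : String :=
  let r := code.toList.foldl stepA (0, 0, 0, false, none, false)
  let b := r.1; let p := r.2.1; let k := r.2.2.1
  let ins := r.2.2.2.1; let sc := r.2.2.2.2.1
  let code2 := code.toList ++
    (if ins then (match sc with | some c => [c] | none => []) else [])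
  let closers := List.replicate (max 0 k).toNat ']' ++
    List.replicate (max 0 p).toNat ')' ++ List.replicate (max 0 b).toNat '}'
  String.ofList (code2 ++ closers)

-- ===== PORT B =====
-- pass one: the escape/string state machine only, collecting the characters outside
-- string literals; returns (outside chars, (in_str, str_char, esc))
def extB : List Char → Bool → Option Char → Bool → List Char × (Bool × Option Char × Bool)
  | [], ins, sc, e => ([], (ins, sc, e))
  | ch :: cs, ins, sc, e =>
    if e then extB cs ins sc false
    else if ch = '\\' then extB cs ins sc true
    else if ins then
      if some ch = sc then extB cs false sc false else extB cs ins sc false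
    else if ch = '"' ∨ ch = '\'' ∨ ch = '`' then extB cs true (some ch) false
    else
      let r := extB cs ins sc false
      (ch :: r.1, r.2)

def balance_js_code_py_alt (code : String) : String :=
  let r := extB code.toList false none false
  let cleaned := r.1
  let suffix := if r.2.1 then (match r.2.2.1 with | some c => [c] | none => []) else []
  let closers :=
    List.replicate (max 0 ((cleaned.count '[' : Int) - (cleaned.count ']' : Int))).toNat ']' ++
    List.replicate (max 0 ((cleaned.count '(' : Int) - (cleaned.count ')' : Int))).toNat ')' ++
    List.replicate (max 0 ((cleaned.count '{' : Int) - (cleaned.count '}' : Int))).toNat '}'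
  String.ofList (code.toList ++ suffix ++ closers)

-- ===== PRECONDITION & SPEC =====
def Spec_balance_js_code_py (code : String) (out : String) : Prop := out = balance_js_code_py_alt code
instance (code : String) (out : String) : Decidable (Spec_balance_js_code_py code out) := by unfold Spec_balance_js_code_py; infer_instance

-- ===== CLAIM (what is proved, stated in full; the proofs are below) =====
def Claim_equal_balance_js_code_py : Prop := ∀ (code : String), Dom_balance_js_code_py code → Spec_balance_js_code_py code (balance_js_code_py code)

-- ===== LEMMAS AND PROOFS =====

theorem foldA_eq_extB (cs : List Char) :
    ∀ (b p k : Int) (ins : Bool) (sc : Option Char) (e : Bool),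
    cs.foldl stepA (b, p, k, ins, sc, e) =
      (b + ((extB cs ins sc e).1.count '{' : Int) - ((extB cs ins sc e).1.count '}' : Int),
       p + ((extB cs ins sc e).1.count '(' : Int) - ((extB cs ins sc e).1.count ')' : Int),
       k + ((extB cs ins sc e).1.count '[' : Int) - ((extB cs ins sc e).1.count ']' : Int),
       (extB cs ins sc e).2) := by
  induction cs with
  | nil => intro b p k ins sc e; simp [extB]
  | cons ch cs ih =>
    intro b p k ins sc e
    simp only [List.foldl_cons, stepA, extB]
    split_ifs with h1 h2 h3 h4 h5 h6 h7 h8 h9 h10 h11 <;>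
      simp only [ih, List.count_cons, Prod.mk.injEq] <;>
      simp_all only [beq_iff_eq, and_true, Char.reduceEq, if_true, if_false] <;>
      (try constructor) <;> (try omega)

theorem balance_js_code_py_eq (code : String) :
    balance_js_code_py code = balance_js_code_py_alt code := by
  unfold balance_js_code_py balance_js_code_py_alt
  simp only [foldA_eq_extB, List.append_assoc, zero_add]

-- ===== VERDICT (by name: the statement is the Claim_ definition above) =====
theorem balance_js_code_py_spec : Claim_equal_balance_js_code_py := by
  intro code _
  unfold Spec_balance_js_code_py
  exact balance_js_code_py_eq code
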